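-- pv_equiv track=rewrite | github.com/981377660LMT/algorithm-study | 5_map/经典题/两数之和/1995. 统计特殊四元组-枚举分割点.py | countQuadruplets2
-- ===== SOURCE A (Python) =====
-- from collections import defaultdict
-- from typing import List
--
-- def countQuadruplets2(nums: List[int]) -> int:
--     """固定中间两个数i2/i3(枚举分割点)，统计左侧两数和，查找右侧两数差
--
--     nums[a] + nums[b] == nums[d] - nums[c]
--     """
--     n, counter = len(nums), defaultdict(int)
--     res = 0
--     for i2 in range(1, n - 2):
--         for i1 in range(i2):
--             counter[nums[i1] + nums[i2]] += 1
--         i3 = i2 + 1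
--         for i4 in range(i3 + 1, n):
--             res += counter[nums[i4] - nums[i3]]
--     return res
-- ===== SOURCE B (Python) =====
-- def countQuadruplets2(nums):
--     """Count quadruplets a<b<c<d with nums[a]+nums[b] == nums[d]-nums[c] by direct
--     nested enumeration: for each split c and each d right of it, scan all left pairs."""
--     n = len(nums)
--     res = 0
--     for c in range(2, n - 1):
--         for d in range(c + 1, n):
--             t = nums[d] - nums[c]
--             for b in range(1, c):
--                 for a in range(b):
--                     if nums[a] + nums[b] == t:
--                         res += 1
--     return res
-- ===== Notes on version B (the rewrite author's own statement) =====
-- stated objective: simpler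
-- what changed: Replaced the running left-sum hashmap over split points by direct nested enumeration: for each split index c and each d>c, the left pairs (a,b) with a<b<c are counted by two explicit inner loops, with no dict at all.
import Mathlib
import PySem

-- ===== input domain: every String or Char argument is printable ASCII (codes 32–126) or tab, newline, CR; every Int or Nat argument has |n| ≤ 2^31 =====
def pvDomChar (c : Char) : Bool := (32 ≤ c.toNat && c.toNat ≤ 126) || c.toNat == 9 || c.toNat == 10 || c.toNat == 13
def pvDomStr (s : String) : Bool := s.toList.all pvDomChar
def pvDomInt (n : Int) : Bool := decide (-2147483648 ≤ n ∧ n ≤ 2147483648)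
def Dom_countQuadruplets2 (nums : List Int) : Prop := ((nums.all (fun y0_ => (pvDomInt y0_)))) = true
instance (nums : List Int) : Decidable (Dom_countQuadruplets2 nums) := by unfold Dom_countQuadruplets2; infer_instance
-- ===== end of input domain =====

-- B replaces A's running left-pair-sum hashmap by direct nested enumeration of the
-- quadruplet (simpler: no dict; objective 'simpler', not faster).

-- ===== PORT A =====
-- inner loop 'for i1 in range(i2): counter[nums[i1]+nums[i2]] += 1'
-- (defaultdict __getitem__ on a missing key stores 0; storing 0 is unobservable through
--  the later getD-with-default-0 reads, so reads are ported as plain getD)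
def pvInnerA (nums : List Int) (i2 : Int) (c : PySem.Dict Int Int) : PySem.Dict Int Int :=
  (PySem.List.pyRange 0 i2 1).foldl (fun c i1 =>
    c.insert (PySem.List.pyGetD nums i1 0 + PySem.List.pyGetD nums i2 0)
      (c.getD (PySem.List.pyGetD nums i1 0 + PySem.List.pyGetD nums i2 0) 0 + 1)) c

-- one iteration of the outer 'for i2 in range(1, n - 2)' loop
def pvStepA (nums : List Int) (st : PySem.Dict Int Int × Int) (i2 : Int) :
    PySem.Dict Int Int × Int :=
  let counter := pvInnerA nums i2 st.1
  let i3 := i2 + 1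
  let res := (PySem.List.pyRange (i3 + 1) (nums.length : Int) 1).foldl
    (fun r i4 =>
      r + counter.getD (PySem.List.pyGetD nums i4 0 - PySem.List.pyGetD nums i3 0) 0) st.2
  (counter, res)

def countQuadruplets2 (nums : List Int) : Int :=
  ((PySem.List.pyRange 1 ((nums.length : Int) - 2) 1).foldl (pvStepA nums)
    (PySem.Dict.empty, 0)).2

-- ===== PORT B =====
def countQuadruplets2_alt (nums : List Int) : Int :=
  let n : Int := (nums.length : Int)
  (PySem.List.pyRange 2 (n - 1) 1).foldl (fun res c =>
    (PySem.List.pyRange (c + 1) n 1).foldl (fun res d =>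
      let t := PySem.List.pyGetD nums d 0 - PySem.List.pyGetD nums c 0
      (PySem.List.pyRange 1 c 1).foldl (fun res b =>
        (PySem.List.pyRange 0 b 1).foldl (fun res a =>
          if PySem.List.pyGetD nums a 0 + PySem.List.pyGetD nums b 0 == t then res + 1
          else res) res) res) res) 0

-- ===== PRECONDITION & SPEC =====
def Spec_countQuadruplets2 (nums : List Int) (out : Int) : Prop := out = countQuadruplets2_alt nums
instance (nums : List Int) (out : Int) : Decidable (Spec_countQuadruplets2 nums out) := by unfold Spec_countQuadruplets2; infer_instance

-- ===== CLAIM (what is proved, stated in full; the proofs are below) =====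
def Claim_equal_countQuadruplets2 : Prop := ∀ (nums : List Int), Dom_countQuadruplets2 nums → Spec_countQuadruplets2 nums (countQuadruplets2 nums)

-- ===== LEMMAS AND PROOFS =====

-- nums[i] as the proofs refer to it
def pvG (nums : List Int) (i : Int) : Int := PySem.List.pyGetD nums i 0

-- number of left pairs (a, b) with 0 ≤ a < b < t and nums[a] + nums[b] = k
def pvP (nums : List Int) (t k : Int) : Int :=
  ((PySem.List.pyRange 1 t 1).map (fun b =>
    ((PySem.List.pyRange 0 b 1).countP (fun a => pvG nums a + pvG nums b == k) : Int))).sum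

-- contribution of split index c to the result
def pvTerm (nums : List Int) (c : Int) : Int :=
  ((PySem.List.pyRange (c + 1) (nums.length : Int) 1).map (fun d =>
    pvP nums c (pvG nums d - pvG nums c))).sum

lemma pvInnerA_getD (nums : List Int) (i2 : Int) (c : PySem.Dict Int Int) (k : Int) :
    (pvInnerA nums i2 c).getD k 0 =
      c.getD k 0 + ((PySem.List.pyRange 0 i2 1).countP (fun a => pvG nums a + pvG nums i2 == k) : Int) := by
  unfold pvInnerA
  rw [← List.foldl_map (f := fun i1 => PySem.List.pyGetD nums i1 0 + PySem.List.pyGetD nums i2 0)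
    (g := fun (d : PySem.Dict Int Int) x => d.insert x (d.getD x 0 + 1))]
  rw [PySem.Dict.getD_foldl_insert_add_one]
  simp [List.count_eq_countP, List.countP_map, pvG, Function.comp_def]

lemma pvP_succ (nums : List Int) (t k : Int) (ht : 1 ≤ t) :
    pvP nums (t + 1) k =
      pvP nums t k + ((PySem.List.pyRange 0 t 1).countP (fun a => pvG nums a + pvG nums t == k) : Int) := by
  unfold pvP
  rw [PySem.List.pyRange_one_succ_right ht]
  simp

lemma pvOuter_inv (nums : List Int) (m : Nat) :
    (∀ k, ((PySem.List.pyRange 1 (1 + (m : Int)) 1).foldl (pvStepA nums)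
        (PySem.Dict.empty, 0)).1.getD k 0 = pvP nums (1 + (m : Int)) k)
    ∧ ((PySem.List.pyRange 1 (1 + (m : Int)) 1).foldl (pvStepA nums)
        (PySem.Dict.empty, 0)).2
      = ((List.range m).map (fun (j : Nat) => pvTerm nums (2 + (j : Int)))).sum := by
  induction m with
  | zero =>
    rw [show ((1:Int) + (0:Nat) = 1) by norm_num, PySem.List.pyRange_one_eq_nil (le_refl 1)]
    constructor
    · intro k; simp [pvP, PySem.List.pyRange_one_eq_nil (le_refl (1:Int))]
    · simp
  | succ m ih =>
    obtain ⟨ihc, ihr⟩ := ih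
    have h1 : (1:Int) + ((m:Nat)+1 : Nat) = (1 + (m:Int)) + 1 := by push_cast; ring
    rw [h1, PySem.List.pyRange_one_succ_right (by omega : (1:Int) ≤ 1 + (m:Int)),
      List.foldl_append, List.foldl_cons, List.foldl_nil]
    set st := (PySem.List.pyRange 1 (1 + (m : Int)) 1).foldl (pvStepA nums) (PySem.Dict.empty, 0) with hst
    have hcnt : ∀ k, (pvInnerA nums (1 + (m:Int)) st.1).getD k 0 = pvP nums ((1 + (m:Int)) + 1) k := by
      intro k
      rw [pvInnerA_getD, ihc, pvP_succ nums _ k (by omega)]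
    constructor
    · intro k
      show (pvInnerA nums (1 + (m:Int)) st.1).getD k 0 = _
      exact hcnt k
    · show (PySem.List.pyRange ((1 + (m:Int)) + 1 + 1) (nums.length : Int) 1).foldl
        (fun r i4 => r + (pvInnerA nums (1 + (m:Int)) st.1).getD
          (PySem.List.pyGetD nums i4 0 - PySem.List.pyGetD nums (1 + (m:Int) + 1) 0) 0) st.2 = _
      rw [PySem.List.foldl_add _ (fun i4 => (pvInnerA nums (1 + (m:Int)) st.1).getD
          (PySem.List.pyGetD nums i4 0 - PySem.List.pyGetD nums (1 + (m:Int) + 1) 0) 0), ihr]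
      rw [List.range_succ, List.map_append, List.sum_append]
      simp only [List.map_cons, List.map_nil, List.sum_cons, List.sum_nil, add_zero]
      congr 1
      unfold pvTerm
      rw [show ((2:Int) + (m:Int) + 1 = 1 + (m:Int) + 1 + 1) by ring]
      congr 1
      apply List.map_congr_left
      intro d _
      rw [hcnt]
      show pvP nums (1 + (m:Int) + 1) _ = pvP nums (2 + (m:Int)) (pvG nums d - pvG nums (2 + (m:Int)))
      rw [show ((1:Int) + (m:Int) + 1 = 2 + (m:Int)) by ring]
      rfl

lemma pvB_eq_sum (nums : List Int) :
    countQuadruplets2_alt nums =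
      ((PySem.List.pyRange 2 ((nums.length : Int) - 1) 1).map (fun c => pvTerm nums c)).sum := by
  unfold countQuadruplets2_alt
  simp only [PySem.List.foldl_if_add_one, PySem.List.foldl_add, pvTerm, pvP, pvG, zero_add]

lemma pvA_eq_B (nums : List Int) : countQuadruplets2 nums = countQuadruplets2_alt nums := by
  rw [pvB_eq_sum]
  unfold countQuadruplets2
  by_cases h : 3 ≤ nums.length
  · have hm : ((nums.length : Int) - 2) = 1 + ((nums.length - 3 : Nat) : Int) := by omega
    rw [hm, (pvOuter_inv nums (nums.length - 3)).2]
    rw [PySem.List.pyRange_one, List.map_map]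
    rw [show (((nums.length:Int) - 1 - 2).toNat = nums.length - 3) by omega]
    rfl
  · rw [PySem.List.pyRange_one_eq_nil (by omega : (nums.length:Int) - 2 ≤ 1),
      PySem.List.pyRange_one_eq_nil (by omega : (nums.length:Int) - 1 ≤ 2)]
    simp

-- ===== VERDICT (by name: the statement is the Claim_ definition above) =====
theorem countQuadruplets2_spec : Claim_equal_countQuadruplets2 := by
  intro nums _
  unfold Spec_countQuadruplets2
  exact pvA_eq_B nums
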